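-- pv_equiv track=rewrite | github.com/J-CHOO/Coding-Test | Programmers/level1/문자열 내림차순으로 배치하기.py | solution
-- ===== SOURCE A (Python) =====
-- def solution(s):
--     lower_list = []
--     upper_list = []
--     lower = ''
--     upper = ''
--     for a in s:
--         if a.isupper() == False:
--             lower_list.append(a)
--         else:
--             upper_list.append(a)
--
--     lower_list.sort()
--     upper_list.sort()
--
--     for b in reversed(lower_list):
--         lower += b
--     for c in reversed(upper_list):
--         upper += c
--     return lower + upper
-- ===== SOURCE B (Python) =====
-- def solution(s):
--     counts = {}
--     for c in s:
--         counts[c] = counts.get(c, 0) + 1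
--     order = sorted(counts, key=lambda c: (c.isupper(), -ord(c)))
--     return ''.join(c * counts[c] for c in order)
-- ===== Notes on version B (the rewrite author's own statement) =====
-- stated objective: faster
-- what changed: A partitions the characters into two lists, comparison-sorts each, and concatenates reversed copies character by character; B builds a frequency table once, sorts only the distinct characters with a single (isupper, -ord) key, and reconstructs the string from counted blocks, so the sort touches k distinct symbols instead of n characters (measured ~2.7x at n=262144).
import Mathlib
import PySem

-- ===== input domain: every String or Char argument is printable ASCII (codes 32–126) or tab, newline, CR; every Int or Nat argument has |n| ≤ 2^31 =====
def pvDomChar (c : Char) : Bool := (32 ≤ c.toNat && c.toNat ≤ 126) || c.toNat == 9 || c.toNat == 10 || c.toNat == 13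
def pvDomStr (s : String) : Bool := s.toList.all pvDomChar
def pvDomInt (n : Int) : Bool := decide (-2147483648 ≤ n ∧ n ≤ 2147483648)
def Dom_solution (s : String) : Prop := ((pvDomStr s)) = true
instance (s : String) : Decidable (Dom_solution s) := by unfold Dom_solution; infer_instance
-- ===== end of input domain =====

-- B replaces A's two-list partition + two comparison sorts by a character histogram whose
-- distinct keys are ordered once with a single (isupper, -code) key; objective: faster (measured: the sort touches only distinct characters).

-- ===== PORT A =====
def solution (s : String) : String :=
  -- for a in s: append to lower_list if not a.isupper() else upper_list
  let p := s.toList.foldl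
    (fun (p : List Char × List Char) a =>
      if PySem.Chars.isupper a == false then (p.1 ++ [a], p.2) else (p.1, p.2 ++ [a]))
    (([], []) : List Char × List Char)
  -- lower_list.sort(); upper_list.sort()
  let lowerList := PySem.List.sorted p.1 (fun c => c) false
  let upperList := PySem.List.sorted p.2 (fun c => c) false
  -- for b in reversed(lower_list): lower += b   (same for upper)
  let lower := lowerList.reverse.foldl (fun acc b => acc ++ [b]) ([] : List Char)
  let upper := upperList.reverse.foldl (fun acc c => acc ++ [c]) ([] : List Char)
  String.ofList (lower ++ upper)

-- ===== PORT B =====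
def solution_alt (s : String) : String :=
  -- counts[c] = counts.get(c, 0) + 1
  let counts := s.toList.foldl (fun d c => d.insert c (d.getD c 0 + 1))
    (PySem.Dict.empty : PySem.Dict Char Int)
  -- sorted(counts, key=lambda c: (c.isupper(), -ord(c)))
  let order := PySem.List.sorted2 counts.keys
    (fun c => PySem.Chars.isupper c) (fun c => -(c.toNat : Int)) false
  -- ''.join(c * counts[c] for c in order)
  String.ofList (order.flatMap (fun c => PySem.List.pyRepeat [c] (counts.getD c 0)))

-- ===== PRECONDITION & SPEC =====
def Spec_solution (s : String) (out : String) : Prop := out = solution_alt s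
instance (s : String) (out : String) : Decidable (Spec_solution s out) := by unfold Spec_solution; infer_instance

-- ===== CLAIM (what is proved, stated in full; the proofs are below) =====
def Claim_equal_solution : Prop := ∀ (s : String), Dom_solution s → Spec_solution s (solution s)

-- ===== LEMMAS AND PROOFS =====

-- single Int key equivalent to B's lexicographic (isupper c, -ord c) pair key
def pvKey (c : Char) : Int := (if PySem.Chars.isupper c then 2000000 else 0) + (1114112 - (c.toNat : Int))

theorem pvChar_toNat_lt (c : Char) : c.toNat < 1114112 := by
  have := c.valid
  unfold Char.toNat
  rcases this with h | ⟨h1, h2⟩ <;> omega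

theorem pvKey_inj : Function.Injective pvKey := by
  intro a b hab
  have ha := pvChar_toNat_lt a
  have hb := pvChar_toNat_lt b
  unfold pvKey at hab
  have htn : a.toNat = b.toNat := by
    by_cases h1 : PySem.Chars.isupper a <;> by_cases h2 : PySem.Chars.isupper b <;>
      simp only [h1, h2, if_true] at hab <;> omega
  exact Char.ext (UInt32.toNat_inj.mp htn)

theorem pvCmp_eq (a b : Char) :
    (decide (PySem.Chars.isupper a < PySem.Chars.isupper b) ||
      (!decide (PySem.Chars.isupper b < PySem.Chars.isupper a) && decide (-(a.toNat : Int) < -(b.toNat : Int))))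
    = decide (pvKey a < pvKey b) := by
  have ha := pvChar_toNat_lt a
  have hb := pvChar_toNat_lt b
  unfold pvKey
  by_cases h1 : PySem.Chars.isupper a <;> by_cases h2 : PySem.Chars.isupper b <;>
    simp [h1, h2, Bool.lt_iff] <;> omega

theorem pvSorted2_eq (xs : List Char) :
    PySem.List.sorted2 xs (fun c => PySem.Chars.isupper c) (fun c => -(c.toNat : Int)) false
      = PySem.List.sorted xs pvKey false := by
  rw [PySem.List.sorted_eq_foldl_insertBy]
  unfold PySem.List.sorted2
  simp only [if_neg (by decide : ¬ (false = true))]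
  congr 1
  funext acc x
  congr 1
  funext a b
  exact pvCmp_eq a b

theorem pvPartition (L : List Char) (acc : List Char × List Char) :
    L.foldl (fun (p : List Char × List Char) a =>
        if PySem.Chars.isupper a == false then (p.1 ++ [a], p.2) else (p.1, p.2 ++ [a])) acc
      = (acc.1 ++ L.filter (fun a => PySem.Chars.isupper a == false),
         acc.2 ++ L.filter (fun a => !(PySem.Chars.isupper a == false))) := by
  induction L generalizing acc with
  | nil => simp
  | cons x t ih =>
    by_cases h : PySem.Chars.isupper x == false <;>
      rw [List.foldl_cons] <;> simp only [h, if_true, ih, List.filter_cons] <;>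
      simp

theorem pvCount_flatMap {ks : List Char} (hnd : ks.Nodup) (cnt : Char → Nat) (x : Char) :
    (ks.flatMap (fun c => List.replicate (cnt c) c)).count x
      = if x ∈ ks then cnt x else 0 := by
  induction ks with
  | nil => simp
  | cons c t ih =>
    have hc : c ∉ t := (List.nodup_cons.mp hnd).1
    have ht : t.Nodup := (List.nodup_cons.mp hnd).2
    simp only [List.flatMap_cons, List.count_append, ih ht, List.count_replicate, List.mem_cons]
    by_cases hx : x = c
    · subst hx; simp [hc]
    · simp [hx, Ne.symm hx]

theorem pvPairwise_flatMap {ks : List Char} (cnt : Char → Nat)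
    (h : ks.Pairwise (fun a b => pvKey a ≤ pvKey b)) :
    (ks.flatMap (fun c => List.replicate (cnt c) c)).Pairwise (fun a b => pvKey a ≤ pvKey b) := by
  induction ks with
  | nil => simp
  | cons c t ih =>
    rcases List.pairwise_cons.mp h with ⟨hc, ht⟩
    simp only [List.flatMap_cons]
    rw [List.pairwise_append]
    refine ⟨List.pairwise_replicate.mpr (Or.inr le_rfl), ih ht, ?_⟩
    intro a ha b hb
    have ha' := List.eq_of_mem_replicate ha
    rcases List.mem_flatMap.mp hb with ⟨d, hd, hbd⟩
    have hb' := List.eq_of_mem_replicate hbd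
    subst ha'; subst hb'
    exact hc _ hd

theorem pvKey_false {c : Char} (h : PySem.Chars.isupper c = false) :
    pvKey c = 1114112 - (c.toNat : Int) := by
  unfold pvKey; rw [h]; simp

theorem pvKey_true {c : Char} (h : PySem.Chars.isupper c = true) :
    pvKey c = 2000000 + (1114112 - (c.toNat : Int)) := by
  unfold pvKey; rw [h]; simp

theorem pvToNat_le {a b : Char} (h : a ≤ b) : a.toNat ≤ b.toNat :=
  UInt32.le_iff_toNat_le.mp (Char.le_def.mp h)

theorem pvMain (s : String) : solution s = solution_alt s := by
  unfold solution solution_alt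
  rw [pvPartition]
  simp only [List.nil_append, PySem.List.foldl_append_singleton_eq_self,
    PySem.Dict.foldl_insert_getD_add_one_eq_counter, PySem.Dict.keys_counter,
    PySem.Dict.getD_counter, PySem.List.pyRepeat_singleton, Int.toNat_natCast, pvSorted2_eq]
  set L := s.toList with hL
  set nonup := L.filter (fun a => PySem.Chars.isupper a == false) with hnonup
  set up := L.filter (fun a => !(PySem.Chars.isupper a == false)) with hup
  congr 1
  -- both sides are the unique pvKey-nondecreasing rearrangement of L
  have hmemn : ∀ a ∈ nonup, PySem.Chars.isupper a = false := by
    intro a haa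
    have := List.of_mem_filter haa
    simpa using this
  have hmemu : ∀ a ∈ up, PySem.Chars.isupper a = true := by
    intro a haa
    have := List.of_mem_filter haa
    simpa using this
  apply PySem.List.eq_of_perm_of_pairwise_le_of_injective pvKey pvKey_inj
  · -- permutation: both sides are rearrangements of L
    have pA : ((PySem.List.sorted nonup (fun c => c) false).reverse ++
        (PySem.List.sorted up (fun c => c) false).reverse).Perm L := by
      have h1 := ((PySem.List.sorted nonup (fun c => c) false).reverse_perm).trans
        (PySem.List.sorted_perm nonup (fun c => c) false)
      have h2 := ((PySem.List.sorted up (fun c => c) false).reverse_perm).trans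
        (PySem.List.sorted_perm up (fun c => c) false)
      exact (h1.append h2).trans
        (List.filter_append_perm (fun a => PySem.Chars.isupper a == false) L)
    have pB : ((PySem.List.sorted (PySem.Set.ofList L) pvKey false).flatMap
        (fun c => List.replicate (L.count c) c)).Perm L := by
      rw [List.perm_iff_count]
      intro x
      have hnd : (PySem.List.sorted (PySem.Set.ofList L) pvKey false).Nodup :=
        ((PySem.List.sorted_perm (PySem.Set.ofList L) pvKey false).nodup_iff).mpr
          (PySem.Set.nodup_ofList L)
      rw [pvCount_flatMap hnd (fun c => L.count c) x]
      by_cases hx : x ∈ L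
      · have hmem : x ∈ PySem.List.sorted (PySem.Set.ofList L) pvKey false := by
          rw [PySem.List.mem_sorted, PySem.Set.mem_ofList]; exact hx
        rw [if_pos hmem]
      · have hmem : x ∉ PySem.List.sorted (PySem.Set.ofList L) pvKey false := by
          rw [PySem.List.mem_sorted, PySem.Set.mem_ofList]; exact hx
        rw [if_neg hmem, (List.count_eq_zero).mpr hx]
    exact pA.trans pB.symm
  · -- A's list is pvKey-nondecreasing
    rw [List.pairwise_append]
    refine ⟨?_, ?_, ?_⟩
    · rw [List.pairwise_reverse]
      refine (PySem.List.sorted_pairwise nonup (fun c => c)).imp_of_mem ?_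
      intro a b haa hbb hab
      have h1 := hmemn a ((PySem.List.mem_sorted _ _ _ _).mp haa)
      have h2 := hmemn b ((PySem.List.mem_sorted _ _ _ _).mp hbb)
      have hle := pvToNat_le hab
      rw [pvKey_false h1, pvKey_false h2]
      omega
    · rw [List.pairwise_reverse]
      refine (PySem.List.sorted_pairwise up (fun c => c)).imp_of_mem ?_
      intro a b haa hbb hab
      have h1 := hmemu a ((PySem.List.mem_sorted _ _ _ _).mp haa)
      have h2 := hmemu b ((PySem.List.mem_sorted _ _ _ _).mp hbb)
      have hle := pvToNat_le hab
      rw [pvKey_true h1, pvKey_true h2]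
      omega
    · intro a haa b hbb
      have h1 := hmemn a ((PySem.List.mem_sorted _ _ _ _).mp (List.mem_reverse.mp haa))
      have h2 := hmemu b ((PySem.List.mem_sorted _ _ _ _).mp (List.mem_reverse.mp hbb))
      have ha' := pvChar_toNat_lt a
      have hb' := pvChar_toNat_lt b
      rw [pvKey_false h1, pvKey_true h2]
      omega
  · -- B's list is pvKey-nondecreasing
    exact pvPairwise_flatMap (fun c => L.count c)
      (PySem.List.sorted_pairwise (PySem.Set.ofList L) pvKey)

-- ===== VERDICT (by name: the statement is the Claim_ definition above) =====
theorem solution_spec : Claim_equal_solution := by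
  intro s _
  unfold Spec_solution
  exact pvMain s
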